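-- pv_equiv track=rewrite | github.com/2213826090/tempfile | ACS_v.18.20.4_1/ACS/acs/src/_ExecutionConfig/OTC/TC/TR/ACS/System/HAL/scripts/hal_lib.py | check_module_info
-- ===== SOURCE A (Python) =====
-- def check_module_info(halctl_output, mod_id, camera_mod_name, camera_mod_author, mandatory=True):
--     if halctl_output == "Could not get HW module for audio":
--         if mandatory:
--             return False
--         else:
--             return True
--     else:
--         # check module info
--         for line in halctl_output.split():
--             if "HW module ID" in line:
--                 m_id = line.split(":")[1].strip()
--                 if m_id != mod_id:
--                     return False
--
--             if "HW module name" in line: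
--                 m_name = line.split(":")[1].strip()
--                 if m_name != camera_mod_name:
--                     return False
--
--             if "HW module author" in line:
--                 m_aut = line.split(":")[1].strip()
--                 if m_aut != camera_mod_author:
--                     return False
--     return True
-- ===== SOURCE B (Python) =====
-- def check_module_info(halctl_output, mod_id, camera_mod_name, camera_mod_author, mandatory=True):
--     # split() yields whitespace-free tokens, so A's substring guards
--     # ("HW module ID" etc., which contain spaces) can never match: the loop is inert.
--     if halctl_output == "Could not get HW module for audio":
--         return not mandatory
--     return True
-- ===== Notes on version B (the rewrite author's own statement) =====
-- stated objective: simpler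
-- what changed: A's per-token loop is dead code (split() tokens contain no spaces while the searched substrings all do), so B drops the loop and returns not mandatory on the error string and True otherwise.
import Mathlib
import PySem

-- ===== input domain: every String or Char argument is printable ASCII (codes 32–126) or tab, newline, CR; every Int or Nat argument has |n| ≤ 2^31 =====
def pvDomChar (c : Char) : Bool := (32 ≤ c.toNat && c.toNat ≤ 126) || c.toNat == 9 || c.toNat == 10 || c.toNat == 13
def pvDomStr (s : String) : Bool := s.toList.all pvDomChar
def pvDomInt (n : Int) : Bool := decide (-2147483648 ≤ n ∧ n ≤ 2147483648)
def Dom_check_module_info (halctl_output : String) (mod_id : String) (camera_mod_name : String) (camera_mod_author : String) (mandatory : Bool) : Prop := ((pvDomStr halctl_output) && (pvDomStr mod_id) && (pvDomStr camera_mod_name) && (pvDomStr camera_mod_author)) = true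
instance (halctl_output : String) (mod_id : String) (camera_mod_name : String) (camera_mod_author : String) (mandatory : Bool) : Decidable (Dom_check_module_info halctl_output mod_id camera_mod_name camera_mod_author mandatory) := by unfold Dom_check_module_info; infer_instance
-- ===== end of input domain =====

-- B drops A's per-token loop, which is dead code: split() tokens contain no spaces while the searched substrings all do.

-- ===== PORT A =====
-- the loop 'for line in halctl_output.split(): …'; the 'none' arms port the IndexError of
-- line.split(":")[1]; they are unreachable (the guards never hold: proved below), so A never raises
def cmiLoop (mod_id : String) (camera_mod_name : String) (camera_mod_author : String) : List String → Bool
  | [] => true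
  | line :: rest =>
    let k3 : Bool :=
      if PySem.Str.isIn "HW module author" line then
        match PySem.List.pyGet? ((PySem.Str.split? line ":").getD []) 1 with
        | none => false
        | some p => if PySem.Str.strip p ≠ camera_mod_author then false
                    else cmiLoop mod_id camera_mod_name camera_mod_author rest
      else cmiLoop mod_id camera_mod_name camera_mod_author rest
    let k2 : Bool :=
      if PySem.Str.isIn "HW module name" line then
        match PySem.List.pyGet? ((PySem.Str.split? line ":").getD []) 1 with
        | none => false
        | some p => if PySem.Str.strip p ≠ camera_mod_name then false else k3
      else k3
    if PySem.Str.isIn "HW module ID" line then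
      match PySem.List.pyGet? ((PySem.Str.split? line ":").getD []) 1 with
      | none => false
      | some p => if PySem.Str.strip p ≠ mod_id then false else k2
    else k2

def check_module_info (halctl_output : String) (mod_id : String) (camera_mod_name : String) (camera_mod_author : String) (mandatory : Bool) : Bool :=
  if halctl_output = "Could not get HW module for audio" then
    if mandatory then false else true
  else
    cmiLoop mod_id camera_mod_name camera_mod_author (PySem.Str.split₀ halctl_output)

-- ===== PORT B =====
def check_module_info_alt (halctl_output : String) (mod_id : String) (camera_mod_name : String) (camera_mod_author : String) (mandatory : Bool) : Bool :=
  if halctl_output = "Could not get HW module for audio" then !mandatory else true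

-- ===== PRECONDITION & SPEC =====
def Spec_check_module_info (halctl_output : String) (mod_id : String) (camera_mod_name : String) (camera_mod_author : String) (mandatory : Bool) (out : Bool) : Prop := out = check_module_info_alt halctl_output mod_id camera_mod_name camera_mod_author mandatory
instance (halctl_output : String) (mod_id : String) (camera_mod_name : String) (camera_mod_author : String) (mandatory : Bool) (out : Bool) : Decidable (Spec_check_module_info halctl_output mod_id camera_mod_name camera_mod_author mandatory out) := by unfold Spec_check_module_info; infer_instance

-- ===== CLAIM (what is proved, stated in full; the proofs are below) =====
def Claim_equal_check_module_info : Prop := ∀ (halctl_output : String) (mod_id : String) (camera_mod_name : String) (camera_mod_author : String) (mandatory : Bool), Dom_check_module_info halctl_output mod_id camera_mod_name camera_mod_author mandatory → Spec_check_module_info halctl_output mod_id camera_mod_name camera_mod_author mandatory (check_module_info halctl_output mod_id camera_mod_name camera_mod_author mandatory)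

-- ===== LEMMAS AND PROOFS =====

-- invariant of split₀.go: tokens built from space-free cur/acc are space-free
theorem go_no_space (s : List Char) (cur : List Char) (acc : List (List Char))
    (hcur : ∀ c ∈ cur, PySem.Chars.isspace c = false)
    (hacc : ∀ t ∈ acc, ∀ c ∈ t, PySem.Chars.isspace c = false) :
    ∀ t ∈ PySem.Chars.split₀.go s cur acc, ∀ c ∈ t, PySem.Chars.isspace c = false := by
  induction s generalizing cur acc with
  | nil =>
    intro t ht
    simp only [PySem.Chars.split₀.go] at ht
    split at ht
    · simp only [List.mem_reverse] at ht; exact hacc t ht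
    · simp only [List.mem_reverse, List.mem_cons] at ht
      rcases ht with h | h
      · subst h; intro c hc; exact hcur c (List.mem_reverse.mp hc)
      · exact hacc t h
  | cons c rest ih =>
    intro t ht
    simp only [PySem.Chars.split₀.go] at ht
    by_cases hs : PySem.Chars.isspace c = true
    · rw [if_pos hs] at ht
      split at ht
      · exact ih [] acc (by simp) hacc t ht
      · refine ih [] (cur.reverse :: acc) (by simp) ?_ t ht
        intro u hu
        rcases List.mem_cons.mp hu with h | h
        · subst h; intro d hd; exact hcur d (List.mem_reverse.mp hd)
        · exact hacc u h
    · rw [if_neg hs] at ht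
      refine ih (c :: cur) acc ?_ hacc t ht
      intro d hd
      rcases List.mem_cons.mp hd with h | h
      · subst h; exact Bool.not_eq_true _ ▸ hs
      · exact hcur d h
-- every token of split₀ is space-free
theorem split₀_no_space (s : List Char) :
    ∀ t ∈ PySem.Chars.split₀ s, ∀ c ∈ t, PySem.Chars.isspace c = false := by
  intro t ht
  exact go_no_space s [] [] (by simp) (by simp) t ht

-- a needle containing a space is never inside a split() token
theorem pvGuardFalse (s line : String) (hline : line ∈ PySem.Str.split₀ s)
    (g : String) (hg : ' ' ∈ g.toList) : PySem.Str.isIn g line = false := by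
  rw [← Bool.not_eq_true, PySem.Str.isIn_iff_infix]
  intro hinf
  have hmem : line.toList ∈ PySem.Chars.split₀ s.toList := by
    have := PySem.Str.split₀_map_toList s
    rw [← this]
    exact List.mem_map_of_mem hline
  have := split₀_no_space s.toList line.toList hmem ' ' (hinf.subset hg)
  simp [PySem.Chars.isspace] at this

-- the whole loop is inert: every guard is false on every token
theorem cmiLoop_true (mod_id camera_mod_name camera_mod_author : String) (s : String)
    (lines : List String) (hsub : ∀ l ∈ lines, l ∈ PySem.Str.split₀ s) :
    cmiLoop mod_id camera_mod_name camera_mod_author lines = true := by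
  induction lines with
  | nil => rfl
  | cons line rest ih =>
    have h1 := pvGuardFalse s line (hsub line (by simp)) "HW module ID" (by decide)
    have h2 := pvGuardFalse s line (hsub line (by simp)) "HW module name" (by decide)
    have h3 := pvGuardFalse s line (hsub line (by simp)) "HW module author" (by decide)
    simp only [cmiLoop, h1, h2, h3, if_false, Bool.false_eq_true]
    exact ih (fun l hl => hsub l (List.mem_cons_of_mem _ hl))

-- ===== VERDICT (by name: the statement is the Claim_ definition above) =====
theorem check_module_info_spec : Claim_equal_check_module_info := by
  intro halctl_output mod_id camera_mod_name camera_mod_author mandatory _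
  unfold Spec_check_module_info check_module_info check_module_info_alt
  by_cases h : halctl_output = "Could not get HW module for audio"
  · rw [if_pos h, if_pos h]; cases mandatory <;> rfl
  · rw [if_neg h, if_neg h]
    exact cmiLoop_true mod_id camera_mod_name camera_mod_author halctl_output _ (fun l hl => hl)
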